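-- pv_equiv track=rewrite | github.com/xu1718191411/AT_CODE_BEGINNER_SELECTION | CONTEXT_133/rain_flows_into_dams.py | calculate
-- ===== SOURCE A (Python) =====
-- def calculate(arr,S):
--
--     result = []
--     even = 0
--     for i in range(len(arr)):
--
--         if i % 2 == 0:
--             even = S-calculate2(i+1,arr[i+1:])
--             result.append(even)
--         else:
--             odd = arr[i-1]*2-even
--             result.append(odd)
--             S = S - even - odd
--
--     return result
--
-- def calculate2(i,arr):
--     # 取偶数项
--     return sum(arr[::2])*2
-- ===== SOURCE B (Python) =====
-- def calculate(arr, S):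
--     n = len(arr)
--     result = []
--     even_pref = 0                      # 2 * sum of even-index elements before i
--     odd_after = 2 * sum(arr[1::2])     # 2 * sum of odd-index elements at or after i
--     even = 0
--     for i in range(n):
--         if i % 2 == 0:
--             even = S - even_pref - odd_after
--             result.append(even)
--             even_pref += 2 * arr[i]
--         else:
--             odd_after -= 2 * arr[i]
--             result.append(2 * arr[i - 1] - even)
--     return result
-- ===== Notes on version B (the rewrite author's own statement) =====
-- stated objective: faster
-- what changed: A recomputes 2*sum(arr[i+1:][::2]) from scratch at every even index; B precomputes the odd-index total once and maintains running prefix/suffix totals updated in O(1) per step, one pass with no slicing.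
import Mathlib
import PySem

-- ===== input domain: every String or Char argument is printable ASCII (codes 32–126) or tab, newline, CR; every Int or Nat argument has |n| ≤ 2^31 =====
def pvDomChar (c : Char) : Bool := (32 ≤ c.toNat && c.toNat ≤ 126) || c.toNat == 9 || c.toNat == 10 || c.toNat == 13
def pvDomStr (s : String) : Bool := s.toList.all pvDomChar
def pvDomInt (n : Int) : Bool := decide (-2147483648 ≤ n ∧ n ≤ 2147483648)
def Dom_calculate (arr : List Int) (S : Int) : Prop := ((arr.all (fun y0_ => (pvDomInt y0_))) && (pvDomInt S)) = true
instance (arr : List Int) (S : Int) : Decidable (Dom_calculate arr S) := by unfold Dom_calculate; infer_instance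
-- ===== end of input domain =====

-- B replaces A's per-even-index suffix re-summation (calculate2) by running prefix/suffix
-- totals updated once per step.

-- ===== PORT A =====
def calculate2 (_i : Int) (arr : List Int) : Int :=   -- Python's i parameter is unused there too
  ((PySem.List.slice? arr none none 2).getD []).sum * 2

def calcStepA (arr : List Int) (st : List Int × Int × Int) (i : Int) :
    List Int × Int × Int :=
  match st with
  | (result, even, S) =>
    if PySem.Int.mod i 2 = 0 then
      let even' := S - calculate2 (i + 1) (PySem.List.slice arr (some (i + 1)) none)
      (result ++ [even'], even', S)
    else
      let odd := (PySem.List.pyGetD arr (i - 1) 0) * 2 - even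
      (result ++ [odd], even, S - even - odd)

def calculate (arr : List Int) (S : Int) : List Int :=
  ((PySem.List.pyRange 0 (arr.length : Int) 1).foldl (calcStepA arr) ([], 0, S)).1

-- ===== PORT B =====
def calcStepB (arr : List Int) (S : Int) (st : List Int × Int × Int × Int) (i : Int) :
    List Int × Int × Int × Int :=
  match st with
  | (result, evenPref, oddAfter, even) =>
    if PySem.Int.mod i 2 = 0 then
      let even' := S - evenPref - oddAfter
      (result ++ [even'], evenPref + 2 * PySem.List.pyGetD arr i 0, oddAfter, even')
    else
      (result ++ [2 * PySem.List.pyGetD arr (i - 1) 0 - even], evenPref,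
        oddAfter - 2 * PySem.List.pyGetD arr i 0, even)

def calculate_alt (arr : List Int) (S : Int) : List Int :=
  let oddTotal :=
    2 * ((PySem.List.slice? (PySem.List.slice arr (some 1) none) none none 2).getD []).sum
  ((PySem.List.pyRange 0 (arr.length : Int) 1).foldl (calcStepB arr S)
    ([], 0, oddTotal, 0)).1

-- ===== PRECONDITION & SPEC =====
def Spec_calculate (arr : List Int) (S : Int) (out : List Int) : Prop := out = calculate_alt arr S
instance (arr : List Int) (S : Int) (out : List Int) : Decidable (Spec_calculate arr S out) := by unfold Spec_calculate; infer_instance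

-- ===== CLAIM (what is proved, stated in full; the proofs are below) =====
def Claim_equal_calculate : Prop := ∀ (arr : List Int) (S : Int), Dom_calculate arr S → Spec_calculate arr S (calculate arr S)

-- ===== LEMMAS AND PROOFS =====

-- the elements of xs at indices 0, 2, 4, … (what Python's xs[::2] collects)
def everyOther : List Int → List Int
  | [] => []
  | [x] => [x]
  | x :: _ :: xs => x :: everyOther xs

theorem everyOther_cons (a : Int) (t : List Int) :
    everyOther (a :: t) = a :: everyOther (t.drop 1) := by
  cases t <;> rfl

theorem fm_eo : ∀ (xs : List Int),
    (List.range ((xs.length + 1) / 2)).filterMap (fun k => xs[2 * k]?) = everyOther xs := by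
  intro xs
  induction xs using everyOther.induct with
  | case1 => simp [everyOther]
  | case2 x => simp [everyOther, List.range_succ]
  | case3 x y xs ih =>
    have hfun : (fun k => (x :: y :: xs)[2 * k]?) ∘ Nat.succ = fun k => xs[2 * k]? := by
      funext k
      simp [Nat.mul_succ]
    have hc : ((x :: y :: xs).length + 1) / 2 = (xs.length + 1) / 2 + 1 := by
      simp; omega
    rw [hc, List.range_succ_eq_map, List.filterMap_cons, everyOther]
    simp only [Nat.mul_zero, List.getElem?_cons_zero, List.filterMap_map, hfun, ih]

theorem slice2_eq_everyOther (xs : List Int) :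
    (PySem.List.slice? xs none none 2).getD [] = everyOther xs := by
  rw [PySem.List.slice?]
  simp only [PySem.List.sliceIndices]
  norm_num
  have h1 : (fun (x : Nat) => xs[(2 * (x : Int)).toNat]?) = fun k => xs[2 * k]? := by
    funext k
    congr 1
  have h2 : (if 0 < xs.length then (((xs.length : Int) + 2 - 1) / 2).toNat else 0)
      = (xs.length + 1) / 2 := by
    split_ifs <;> omega
  rw [h1, h2, fm_eo]

theorem calc_main (arr : List Int) (S : Int) :
    ∀ (fuel i : Nat) (res : List Int) (evA ep oa evB SA : Int),
      i % 2 = 0 → arr.length ≤ i + 2 * fuel → SA = S - ep →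
      oa = 2 * (everyOther (arr.drop (i + 1))).sum →
      ((PySem.List.pyRange (i : Int) (arr.length : Int) 1).foldl (calcStepA arr)
          (res, evA, SA)).1
        = ((PySem.List.pyRange (i : Int) (arr.length : Int) 1).foldl (calcStepB arr S)
          (res, ep, oa, evB)).1 := by
  intro fuel
  induction fuel with
  | zero =>
    intro i res evA ep oa evB SA hpar hlen hS hoa
    rw [PySem.List.pyRange_one_eq_nil (by exact_mod_cast (by omega : arr.length ≤ i))]
    rfl
  | succ fuel ih =>
    intro i res evA ep oa evB SA hpar hlen hS hoa
    by_cases hi : i < arr.length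
    · rw [PySem.List.pyRange_one_cons (by exact_mod_cast hi)]
      simp only [List.foldl_cons]
      have hmod0 : PySem.Int.mod (i : Int) 2 = 0 := by
        rw [PySem.Int.mod_eq_emod_of_pos (by norm_num)]; omega
      have hcast : (i : Int) + 1 = ((i + 1 : Nat) : Int) := by push_cast; ring
      simp only [calcStepA, calcStepB, hmod0, if_pos, calculate2, hcast,
        PySem.List.slice_from_natCast, slice2_eq_everyOther, PySem.List.pyGetD_natCast]
      rw [show SA - (everyOther (arr.drop (i + 1))).sum * 2 = S - ep - oa from by omega]
      by_cases hi1 : i + 1 < arr.length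
      · rw [PySem.List.pyRange_one_cons (by exact_mod_cast hi1)]
        simp only [List.foldl_cons]
        have hmod1 : ¬ PySem.Int.mod ((i + 1 : Nat) : Int) 2 = 0 := by
          rw [PySem.Int.mod_eq_emod_of_pos (by norm_num)]; omega
        have hcast1 : ((i + 1 : Nat) : Int) - 1 = ((i : Nat) : Int) := by push_cast; ring
        simp only [calcStepA, calcStepB, hmod1, if_neg, hcast1, PySem.List.pyGetD_natCast,
          not_false_iff]
        rw [show arr.getD i 0 * 2 = 2 * arr.getD i 0 from mul_comm _ _]
        rw [show ((i + 1 : Nat) : Int) + 1 = ((i + 2 : Nat) : Int) from by push_cast; ring]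
        apply ih (i + 2)
        · omega
        · omega
        · omega
        · have hd : arr.drop (i + 1) = arr[i + 1] :: arr.drop (i + 2) :=
            List.drop_eq_getElem_cons hi1
          rw [hoa, hd, everyOther_cons, List.drop_drop,
            List.getD_eq_getElem arr 0 hi1, List.sum_cons]
          ring
      · rw [PySem.List.pyRange_one_eq_nil (by exact_mod_cast (by omega : arr.length ≤ i + 1))]
        rfl
    · rw [PySem.List.pyRange_one_eq_nil (by exact_mod_cast (by omega : arr.length ≤ i))]
      rfl

-- ===== VERDICT (by name: the statement is the Claim_ definition above) =====
theorem calculate_spec : Claim_equal_calculate := by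
  intro arr S _
  unfold Spec_calculate calculate calculate_alt
  have h := calc_main arr S arr.length 0 [] 0 0
    (2 * ((PySem.List.slice? (PySem.List.slice arr (some 1) none) none none 2).getD []).sum)
    0 S (by omega) (by omega) (by omega)
    (by rw [PySem.List.slice_from_one, slice2_eq_everyOther]; simp [List.drop_one])
  exact_mod_cast h
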